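-- pv_equiv track=rewrite | github.com/frontenddeveloper-lab/Phormula-tool | backend/app/routes/conversion_rate_routes.py | _month_year_iter
-- ===== SOURCE A (Python) =====
-- from typing import Iterator, Tuple
--
-- def _month_year_iter(
--     start_year: int, start_month: int, end_year: int, end_month: int
-- ) -> Iterator[Tuple[int, int]]:
--     """Yield (year, month_number) inclusive from start to end."""
--     y, m = start_year, start_month
--     while (y < end_year) or (y == end_year and m <= end_month):
--         yield y, m
--         m += 1
--         if m == 13:
--             m = 1
--             y += 1
-- ===== SOURCE B (Python) =====
-- def _month_year_iter(start_year, start_month, end_year, end_month):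
--     """Yield (year, month_number) inclusive from start to end."""
--     for idx in range(start_year * 12 + start_month - 1, end_year * 12 + end_month):
--         y, m = divmod(idx, 12)
--         yield y, m + 1
-- ===== Notes on version B (the rewrite author's own statement) =====
-- stated objective: idiomatic
-- what changed: Replaces the while-loop with mutable (y,m) state and the manual month-13 carry branch by arithmetic on absolute month indices: a single range() over year*12+month-1 indices decoded with divmod.
-- outside the precondition, e.g. on _month_year_iter(0, 0, 0, 0): A returns [(0, 0)], B returns [(-1, 12)]
import Mathlib
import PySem

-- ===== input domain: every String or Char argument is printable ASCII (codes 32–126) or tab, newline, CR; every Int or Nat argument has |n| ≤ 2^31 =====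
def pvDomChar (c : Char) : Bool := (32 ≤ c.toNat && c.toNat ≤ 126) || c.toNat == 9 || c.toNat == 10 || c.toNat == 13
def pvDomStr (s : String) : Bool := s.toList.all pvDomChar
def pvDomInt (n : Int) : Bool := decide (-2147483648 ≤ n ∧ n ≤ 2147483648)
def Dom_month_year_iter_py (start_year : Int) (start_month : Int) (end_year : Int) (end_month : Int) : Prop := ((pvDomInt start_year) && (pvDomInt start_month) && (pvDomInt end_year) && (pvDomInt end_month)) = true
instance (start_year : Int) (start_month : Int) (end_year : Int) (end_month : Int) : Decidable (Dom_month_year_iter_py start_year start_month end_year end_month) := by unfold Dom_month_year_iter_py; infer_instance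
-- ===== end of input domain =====

-- B replaces A's while-loop with mutable (y,m) state and manual month-13 carry by a single
-- range over absolute month indices decoded with divmod (idiomatic; same O(n) cost).

-- ===== PORT A =====
-- A's while-loop as fuel recursion; the fuel merely makes the loop total and is
-- sufficient whenever the months lie in 1..12 (Pre_), where each step moves the
-- absolute month index y*12+m up by exactly 1.
def myiLoop : Nat → Int → Int → Int → Int → List (Int × Int)
  | 0, _, _, _, _ => []
  | Nat.succ f, y, m, ey, em =>
    if y < ey ∨ (y = ey ∧ m ≤ em) then
      (y, m) ::
        (if m + 1 = 13 then myiLoop f (y + 1) 1 ey em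
         else myiLoop f y (m + 1) ey em)
    else []

def month_year_iter_py (start_year : Int) (start_month : Int) (end_year : Int) (end_month : Int) : List (Int × Int) :=
  myiLoop ((max (end_year * 12 + 13) (end_year * 12 + end_month + 1)
              - (start_year * 12 + start_month) + 1).toNat + 1)
    start_year start_month end_year end_month

-- ===== PORT B =====
def month_year_iter_py_alt (start_year : Int) (start_month : Int) (end_year : Int) (end_month : Int) : List (Int × Int) :=
  (PySem.List.pyRange (start_year * 12 + start_month - 1) (end_year * 12 + end_month) 1).map
    (fun idx => (PySem.Int.floordiv idx 12, PySem.Int.mod idx 12 + 1))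

-- ===== PRECONDITION & SPEC =====
-- Pre_ admits the calendar range 1..12 for both months (the function's natural domain),
-- plus the inputs where the start lies after the end under both orderings, on which both
-- programs return []; the remaining out-of-range-month inputs are excluded because there
-- A's carry-at-13 loop either diverges (e.g. start_month ≥ 14 with start_year < end_year)
-- or returns values of no calendar meaning that B does not match.
def Pre_month_year_iter_py (start_year : Int) (start_month : Int) (end_year : Int) (end_month : Int) : Prop :=
  (1 ≤ start_month ∧ start_month ≤ 12 ∧ 1 ≤ end_month ∧ end_month ≤ 12) ∨
  ((end_year < start_year ∨ (end_year = start_year ∧ end_month < start_month)) ∧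
    end_year * 12 + end_month ≤ start_year * 12 + start_month - 1)

instance (start_year : Int) (start_month : Int) (end_year : Int) (end_month : Int) : Decidable (Pre_month_year_iter_py start_year start_month end_year end_month) := by unfold Pre_month_year_iter_py; infer_instance

def pvWitness_month_year_iter_py : Int × Int × Int × Int := (2020, 5, 2021, 2)

def Spec_month_year_iter_py (start_year : Int) (start_month : Int) (end_year : Int) (end_month : Int) (out : List (Int × Int)) : Prop := out = month_year_iter_py_alt start_year start_month end_year end_month
instance (start_year : Int) (start_month : Int) (end_year : Int) (end_month : Int) (out : List (Int × Int)) : Decidable (Spec_month_year_iter_py start_year start_month end_year end_month out) := by unfold Spec_month_year_iter_py; infer_instance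

-- ===== CLAIM (what is proved, stated in full; the proofs are below) =====
def Claim_equal_month_year_iter_py : Prop := ∀ (start_year : Int) (start_month : Int) (end_year : Int) (end_month : Int), Dom_month_year_iter_py start_year start_month end_year end_month → Pre_month_year_iter_py start_year start_month end_year end_month → Spec_month_year_iter_py start_year start_month end_year end_month (month_year_iter_py start_year start_month end_year end_month)

-- ===== LEMMAS AND PROOFS =====

-- decoding an absolute month index: divmod inverts y*12+(m-1) when 1 ≤ m ≤ 12
lemma myi_decode (y m : Int) (hm1 : 1 ≤ m) (hm2 : m ≤ 12) :
    PySem.Int.floordiv (y * 12 + m - 1) 12 = y ∧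
    PySem.Int.mod (y * 12 + m - 1) 12 + 1 = m := by
  have hq : PySem.Int.floordiv (y * 12 + m - 1) 12 = y := by
    rw [PySem.Int.floordiv_eq_iff_of_pos (by norm_num)]
    omega
  refine ⟨hq, ?_⟩
  have hd := PySem.Int.floordiv_mul_add_mod (y * 12 + m - 1) 12
  rw [hq] at hd
  omega

-- loop invariant: with months in 1..12, A's loop from (y, m) produces exactly the
-- decoded index range [y*12+m-1, ey*12+em)
lemma myiLoop_eq (f : Nat) (y m ey em : Int)
    (hm1 : 1 ≤ m) (hm2 : m ≤ 12) (hem1 : 1 ≤ em) (hem2 : em ≤ 12)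
    (hf : ((ey * 12 + em) - (y * 12 + m) + 1).toNat < f) :
    myiLoop f y m ey em =
      (PySem.List.pyRange (y * 12 + m - 1) (ey * 12 + em) 1).map
        (fun idx => (PySem.Int.floordiv idx 12, PySem.Int.mod idx 12 + 1)) := by
  induction f generalizing y m with
  | zero => omega
  | succ f ih =>
    by_cases hc : y < ey ∨ (y = ey ∧ m ≤ em)
    · have hlt : y * 12 + m - 1 < ey * 12 + em := by omega
      rw [myiLoop, if_pos hc, PySem.List.pyRange_one_cons hlt, List.map_cons]
      obtain ⟨hq, hr⟩ := myi_decode y m hm1 hm2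
      by_cases h13 : m + 1 = 13
      · rw [if_pos h13, ih (y + 1) 1 (by omega) (by omega) (by omega)]
        have he : (y + 1) * 12 + 1 - 1 = y * 12 + m - 1 + 1 := by omega
        rw [he, hq, hr]
      · rw [if_neg h13, ih y (m + 1) (by omega) (by omega) (by omega)]
        have he : y * 12 + (m + 1) - 1 = y * 12 + m - 1 + 1 := by omega
        rw [he, hq, hr]
    · rw [myiLoop, if_neg hc, PySem.List.pyRange_one_eq_nil (by omega), List.map_nil]

-- ===== VERDICT (by name: the statement is the Claim_ definition above) =====
theorem month_year_iter_py_spec : Claim_equal_month_year_iter_py := by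
  intro sy sm ey em _ hpre
  unfold Spec_month_year_iter_py month_year_iter_py month_year_iter_py_alt
  rcases hpre with ⟨h1, h2, h3, h4⟩ | ⟨horder, hidx⟩
  · exact myiLoop_eq _ sy sm ey em h1 h2 h3 h4 (by omega)
  · rw [myiLoop, if_neg (by omega), PySem.List.pyRange_one_eq_nil (by omega), List.map_nil]
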